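-- pv_equiv track=rewrite | github.com/Molostov-Gregory/trends_voyager_bot | Voyager/TableManager.py | Sorter_request_list
-- ===== SOURCE A (Python) =====
-- import copy
--
-- def Extract_unique_queries(values):
--     unique_list = []
--     if type(values) is list:
--         for value in values:
--             if type(value) is list:
--                 if not value[1] in unique_list:
--                     unique_list.append(value[1])
--
--     return(unique_list)
--
-- def Sorter_request_list(old_list):
--     new_list = copy.deepcopy(old_list)
--     string_list = Extract_unique_queries(new_list)
--     sorter_list = []
--     queries_row = []
--     for query in string_list:
--         for index, value in reversed(list(enumerate(new_list))):
--             verification_query = new_list[index][1]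
--             if query == verification_query:
--                 queries_row.append(copy.deepcopy(new_list[index]))
--                 new_list.pop(index)
--         queries_row = sorted(queries_row, key=lambda l1: l1[0])
--         sorter_list.append(copy.deepcopy(queries_row))
--         queries_row = []
--     return sorter_list
-- ===== SOURCE B (Python) =====
-- def Sorter_request_list(old_list):
--     buckets = {}
--     for row in old_list:
--         buckets.setdefault(row[1], []).append(list(row))
--     return [sorted(reversed(buckets[key]), key=lambda r: r[0]) for key in buckets]
-- ===== Notes on version B (the rewrite author's own statement) =====
-- stated objective: faster
-- what changed: Instead of rescanning and popping the remaining rows in reverse once per unique query, B builds the buckets in one pass over the list with dict.setdefault (key order = first occurrence), then stably sorts each reversed bucket.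
import Mathlib
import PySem

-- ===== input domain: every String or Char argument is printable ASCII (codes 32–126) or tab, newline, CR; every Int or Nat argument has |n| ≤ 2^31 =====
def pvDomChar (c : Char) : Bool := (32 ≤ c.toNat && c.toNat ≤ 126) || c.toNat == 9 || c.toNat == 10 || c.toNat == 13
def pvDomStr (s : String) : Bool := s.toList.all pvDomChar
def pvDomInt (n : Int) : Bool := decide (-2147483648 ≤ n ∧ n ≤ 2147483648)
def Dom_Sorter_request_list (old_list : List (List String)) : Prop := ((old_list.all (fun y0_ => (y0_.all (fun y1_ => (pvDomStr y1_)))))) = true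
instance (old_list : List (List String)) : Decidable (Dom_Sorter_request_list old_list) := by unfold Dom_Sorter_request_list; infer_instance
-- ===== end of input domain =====

-- B replaces A's per-unique-query reversed scan (with repeated list.pop) over the remaining rows
-- by a single dict-bucketing pass, then sorts each reversed bucket; objective: faster.

-- ===== PORT A =====
-- Extract_unique_queries (the 'type(...) is list' checks are always true under these types)
def aExtract (values : List (List String)) : List String :=
  values.foldl (fun unique_list value =>
    if (PySem.List.pyGetD value 1 "") ∈ unique_list then unique_list
    else unique_list ++ [PySem.List.pyGetD value 1 ""]) []

-- one step of A's inner 'for index, value in reversed(list(enumerate(new_list)))' loop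
def aInnerStep (query : String)
    (st : List (List String) × List (List String)) (iv : Int × List String) :
    List (List String) × List (List String) :=
  let verification_query := PySem.List.pyGetD (PySem.List.pyGetD st.2 iv.1 []) 1 ""
  if query == verification_query then
    (st.1 ++ [PySem.List.pyGetD st.2 iv.1 []],
     ((PySem.List.pop? st.2 iv.1).map Prod.snd).getD st.2)
  else st

def aInner (query : String) (new_list : List (List String)) :
    List (List String) × List (List String) :=
  (PySem.List.enumerate new_list 0).reverse.foldl (aInnerStep query) ([], new_list)

-- one step of A's outer 'for query in string_list' loop (state: sorter_list, new_list)
def aOuterStep (st : List (List (List String)) × List (List String)) (query : String) :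
    List (List (List String)) × List (List String) :=
  let r := aInner query st.2
  (st.1 ++ [PySem.List.sorted r.1 (fun l1 => PySem.List.pyGetD l1 0 "") false], r.2)

def Sorter_request_list (old_list : List (List String)) : List (List (List String)) :=
  let new_list := old_list   -- copy.deepcopy (values immutable here; equivalence is about the return value)
  let string_list := aExtract new_list
  (string_list.foldl aOuterStep ([], new_list)).1

-- ===== PORT B =====
-- buckets = {}; for row in old_list: buckets.setdefault(row[1], []).append(list(row))
def bBuckets (old_list : List (List String)) : PySem.Dict String (List (List String)) :=
  old_list.foldl (fun d row =>
    d.modify (PySem.List.pyGetD row 1 "") [] (fun g => g ++ [row])) PySem.Dict.empty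

def Sorter_request_list_alt (old_list : List (List String)) : List (List (List String)) :=
  let buckets := bBuckets old_list
  buckets.keys.map (fun k =>
    PySem.List.sorted (buckets.getD k []).reverse (fun r => PySem.List.pyGetD r 0 "") false)

-- ===== PRECONDITION & SPEC =====
-- Pre_ excludes rows shorter than 2 elements, on which the Python A raises IndexError at value[1].
def Pre_Sorter_request_list (old_list : List (List String)) : Prop :=
  ∀ row ∈ old_list, 2 ≤ row.length
instance (old_list : List (List String)) : Decidable (Pre_Sorter_request_list old_list) := by
  unfold Pre_Sorter_request_list; infer_instance

def pvWitness_Sorter_request_list : List (List String) :=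
  [["b", "q"], ["a", "q"], ["c", "p"]]

def Spec_Sorter_request_list (old_list : List (List String)) (out : List (List (List String))) : Prop := out = Sorter_request_list_alt old_list
instance (old_list : List (List String)) (out : List (List (List String))) : Decidable (Spec_Sorter_request_list old_list out) := by unfold Spec_Sorter_request_list; infer_instance

-- ===== CLAIM (what is proved, stated in full; the proofs are below) =====
def Claim_equal_Sorter_request_list : Prop := ∀ (old_list : List (List String)), Dom_Sorter_request_list old_list → Pre_Sorter_request_list old_list → Spec_Sorter_request_list old_list (Sorter_request_list old_list)

-- ===== LEMMAS AND PROOFS =====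

-- the row key A and B group by: row[1] (ported as pyGetD with default "")
def pvKey (r : List String) : String := PySem.List.pyGetD r 1 ""

-- A's inner loop collects, in reversed order, the rows whose key is `q` and removes them
lemma aInner_foldl (q : String) (xs : List (List String)) :
    ∀ (kept qr : List (List String)),
    (PySem.List.enumerate xs 0).reverse.foldl (aInnerStep q) (qr, xs ++ kept)
      = (qr ++ (xs.filter (fun r => q == pvKey r)).reverse,
         xs.filter (fun r => !(q == pvKey r)) ++ kept) := by
  induction xs using List.reverseRecOn with
  | nil => intro kept qr; simp [PySem.List.enumerate]
  | append_singleton ys y ih =>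
    intro kept qr
    rw [PySem.List.enumerate_append]
    have hget : PySem.List.pyGetD ((ys ++ [y]) ++ kept) ((0 : Int) + (ys.length : Int)) [] = y := by
      rw [zero_add, List.append_assoc, PySem.List.pyGetD_natCast]
      simp [List.getD]
    have hpop : ((PySem.List.pop? ((ys ++ [y]) ++ kept) ((0 : Int) + (ys.length : Int))).map
        Prod.snd).getD ((ys ++ [y]) ++ kept) = ys ++ kept := by
      rw [zero_add, List.append_assoc,
        PySem.List.pop?_natCast (ys ++ ([y] ++ kept)) ys.length (by simp)]
      simp [List.eraseIdx_append_of_length_le (Nat.le_refl ys.length)]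
    simp only [PySem.List.enumerate_cons, PySem.List.enumerate_nil, List.reverse_append,
      List.reverse_cons, List.reverse_nil, List.nil_append, List.cons_append, List.foldl_cons]
    by_cases h : q == pvKey y
    · have hstep : aInnerStep q (qr, (ys ++ [y]) ++ kept) ((0 : Int) + (ys.length : Int), y)
          = (qr ++ [y], ys ++ kept) := by
        simp only [aInnerStep, hget, hpop]
        simp [pvKey] at h
        simp [h]
      rw [hstep, ih kept (qr ++ [y])]
      have hq : (q == pvKey y) = true := h
      simp [List.filter_append, hq]
    · have hstep : aInnerStep q (qr, (ys ++ [y]) ++ kept) ((0 : Int) + (ys.length : Int), y)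
          = (qr, ys ++ ([y] ++ kept)) := by
        simp only [aInnerStep, hget]
        simp only [pvKey] at h
        simp [h]
      rw [hstep, ih ([y] ++ kept) qr]
      have hq : (q == pvKey y) = false := by simpa using h
      simp [List.filter_append, hq]

lemma aInner_eq (q : String) (nl : List (List String)) :
    aInner q nl = ((nl.filter (fun r => q == pvKey r)).reverse,
                   nl.filter (fun r => !(q == pvKey r))) := by
  have h := aInner_foldl q nl [] []
  simp only [List.append_nil, List.nil_append] at h
  rw [aInner, h]

-- Extract_unique_queries is the ordered dedup of the keys
lemma aExtract_eq (xs : List (List String)) :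
    aExtract xs = PySem.Set.ofList (xs.map pvKey) := by
  have hf : (fun (u : List String) v =>
      if (PySem.List.pyGetD v 1 "") ∈ u then u else u ++ [PySem.List.pyGetD v 1 ""])
      = fun (u : PySem.Set String) v => PySem.Set.add u (pvKey v) := by
    funext u v
    rw [PySem.Set.add_eq_ite]
    rfl
  rw [aExtract, hf, ← PySem.Set.update_map_eq_foldl_add xs pvKey ([] : PySem.Set String)]
  rfl

-- A's outer loop, under the invariant that cur agrees with old_list on every remaining key
lemma aOuter_foldl (old : List (List String)) (qs : List String) :
    qs.Nodup →
    ∀ (cur : List (List String)) (acc : List (List (List String))),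
    (∀ q ∈ qs, cur.filter (fun r => q == pvKey r) = old.filter (fun r => q == pvKey r)) →
    (qs.foldl aOuterStep (acc, cur)).1
      = acc ++ qs.map (fun q =>
          PySem.List.sorted ((old.filter (fun r => q == pvKey r)).reverse)
            (fun l1 => PySem.List.pyGetD l1 0 "") false) := by
  induction qs with
  | nil => intro _ cur acc _; simp
  | cons q qs ih =>
    intro hnd cur acc h
    have hstep : aOuterStep (acc, cur) q
        = (acc ++ [PySem.List.sorted ((old.filter (fun r => q == pvKey r)).reverse)
              (fun l1 => PySem.List.pyGetD l1 0 "") false],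
           cur.filter (fun r => !(q == pvKey r))) := by
      simp only [aOuterStep, aInner_eq]
      rw [h q (by simp)]
    rw [List.foldl_cons, hstep,
      ih hnd.of_cons (cur.filter (fun r => !(q == pvKey r))) _ ?_]
    · simp
    · intro q' hq'
      have hne : q' ≠ q := fun he => (List.nodup_cons.mp hnd).1 (he ▸ hq')
      have hfun : (fun r => (q' == pvKey r) && !(q == pvKey r))
          = (fun r => q' == pvKey r) := by
        funext r
        by_cases hr : q' == pvKey r
        · have hk : pvKey r = q' := (eq_of_beq hr).symm
          have hq : ¬ (q == pvKey r) = true := by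
            rw [hk]; exact fun he => hne (eq_of_beq he).symm
          simp [hr, hq]
        · simp [hr]
      rw [List.filter_filter, hfun, h q' (by simp [hq'])]

-- A computed in closed form
lemma sorterA_eq (old : List (List String)) :
    Sorter_request_list old
      = (PySem.Set.ofList (old.map pvKey)).map (fun q =>
          PySem.List.sorted ((old.filter (fun r => q == pvKey r)).reverse)
            (fun l1 => PySem.List.pyGetD l1 0 "") false) := by
  rw [Sorter_request_list]
  rw [aExtract_eq]
  exact aOuter_foldl old _ (PySem.Set.nodup_ofList _) old [] (fun _ _ => rfl)

-- B's buckets: key list and per-key contents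
lemma bBuckets_append (xs : List (List String)) (r : List String) :
    bBuckets (xs ++ [r])
      = (bBuckets xs).modify (pvKey r) [] (fun g => g ++ [r]) := by
  simp [bBuckets, List.foldl_append, pvKey]

lemma bBuckets_getD (xs : List (List String)) (q : String) :
    (bBuckets xs).getD q [] = xs.filter (fun r => q == pvKey r) := by
  induction xs using List.reverseRecOn with
  | nil => simp [bBuckets, PySem.Dict.getD_empty]
  | append_singleton ys y ih =>
    rw [bBuckets_append, PySem.Dict.getD_modify, List.filter_append]
    by_cases h : q = pvKey y
    · subst h; simp [ih]
    · have : (q == pvKey y) = false := by simpa using h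
      simp [h, ih, this]

lemma bBuckets_keys (xs : List (List String)) :
    (bBuckets xs).keys = PySem.Set.ofList (xs.map pvKey) := by
  induction xs using List.reverseRecOn with
  | nil => simp [bBuckets, PySem.Set.ofList]
  | append_singleton ys y ih =>
    rw [bBuckets_append, PySem.Dict.keys_modify, List.map_append,
      PySem.Set.ofList_eq_foldl, List.foldl_append, ← PySem.Set.ofList_eq_foldl]
    simp only [List.map_cons, List.map_nil, List.foldl_cons, List.foldl_nil]
    rw [PySem.Set.add_eq_ite]
    by_cases h : pvKey y ∈ PySem.Set.ofList (ys.map pvKey)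
    · rw [PySem.Dict.keys_insert_of_contains _ _ (by rw [PySem.Dict.contains_iff_mem_keys, ih]; exact h)]
      simp [h, ih]
    · rw [PySem.Dict.keys_insert_of_not_contains _ _ (by
        rw [← Bool.not_eq_true, PySem.Dict.contains_iff_mem_keys, ih]; exact h)]
      simp [h, ih]

-- ===== VERDICT (by name: the statement is the Claim_ definition above) =====
theorem Sorter_request_list_spec : Claim_equal_Sorter_request_list := by
  intro old _ _
  show Sorter_request_list old = Sorter_request_list_alt old
  rw [sorterA_eq, Sorter_request_list_alt]
  show _ = (bBuckets old).keys.map _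
  rw [bBuckets_keys]
  apply List.map_congr_left
  intro q _
  rw [bBuckets_getD]
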